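-- pv_equiv track=rewrite | github.com/smbduy/https-gitflic.ru-project-security-by-design-demos-developers-sbd-drones-economics | scripts/prepare_multi.py | _split_port_string
-- ===== SOURCE A (Python) =====
-- from typing import Any, Dict, List, Optional, Tuple
--
-- def _split_port_string(s: str) -> List[str]:
--     """Split on ':' that is outside ${...} braces."""
--     parts: List[str] = []
--     depth = 0
--     current: List[str] = []
--     for ch in s:
--         if ch == "$" or (ch == "{" and current and current[-1] == "$"):
--             current.append(ch)
--             if ch == "{":
--                 depth += 1
--             continue
--         if ch == "}" and depth > 0:
--             depth -= 1
--             current.append(ch)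
--             continue
--         if ch == ":" and depth == 0:
--             parts.append("".join(current))
--             current = []
--             continue
--         current.append(ch)
--     parts.append("".join(current))
--     return parts
-- ===== SOURCE B (Python) =====
-- from typing import List
--
-- def _depth_after(depth: int, piece: str) -> int:
--     prev = None
--     for ch in piece:
--         if ch == "{" and prev == "$":
--             depth += 1
--         elif ch == "}" and depth > 0:
--             depth -= 1
--         prev = ch
--     return depth
--
-- def _split_port_string(s: str) -> List[str]:
--     """Split on ':' that is outside ${...} braces: split eagerly, then merge."""
--     pieces = s.split(":")
--     parts: List[str] = []
--     buf = pieces[0]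
--     depth = _depth_after(0, pieces[0])
--     for piece in pieces[1:]:
--         if depth == 0:
--             parts.append(buf)
--             buf = piece
--         else:
--             buf += ":" + piece
--         depth = _depth_after(depth, piece)
--     parts.append(buf)
--     return parts
-- ===== Notes on version B (the rewrite author's own statement) =====
-- stated objective: faster
-- what changed: Instead of one char-by-char state machine that both splits and tracks brace depth, B splits on every colon up front with str.split (C level) and then merges pieces back together, re-scanning only each piece to update the dollar-brace depth that decides whether a boundary was a real split point.
import Mathlib
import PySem

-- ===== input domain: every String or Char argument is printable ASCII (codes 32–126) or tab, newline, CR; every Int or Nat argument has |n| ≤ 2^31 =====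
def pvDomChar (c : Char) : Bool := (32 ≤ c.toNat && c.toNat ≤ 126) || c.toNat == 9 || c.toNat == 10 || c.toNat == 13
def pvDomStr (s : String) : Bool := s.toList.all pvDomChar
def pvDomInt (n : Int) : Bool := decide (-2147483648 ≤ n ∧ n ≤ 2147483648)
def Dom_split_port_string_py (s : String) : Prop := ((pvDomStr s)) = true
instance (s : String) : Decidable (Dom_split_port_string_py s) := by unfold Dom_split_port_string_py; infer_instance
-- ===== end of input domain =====

-- B splits on every ':' first (one library split) and then merges pieces while tracking ${...} depth;
-- A is a single char-by-char state machine. Same return value on all inputs (both are total).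

-- ===== PORT A =====
-- one loop step of A; `current.getLast? = some '$'` encodes Python's `current and current[-1] == "$"`
def pvStepA (st : List (List Char) × Int × List Char) (ch : Char) :
    List (List Char) × Int × List Char :=
  let (parts, depth, current) := st
  if ch = '$' ∨ (ch = '{' ∧ current.getLast? = some '$') then
    (parts, (if ch = '{' then depth + 1 else depth), current ++ [ch])
  else if ch = '}' ∧ 0 < depth then
    (parts, depth - 1, current ++ [ch])
  else if ch = ':' ∧ depth = 0 then
    (parts ++ [current], depth, [])
  else
    (parts, depth, current ++ [ch])

def split_port_string_py (s : String) : List String :=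
  let r := s.toList.foldl pvStepA ([], 0, [])
  (r.1 ++ [r.2.2]).map String.ofList

-- ===== PORT B =====
-- `_depth_after`: fold over the piece carrying (depth, prev char)
def pvDepthStep (st : Int × Option Char) (ch : Char) : Int × Option Char :=
  (if ch = '{' ∧ st.2 = some '$' then st.1 + 1
   else if ch = '}' ∧ 0 < st.1 then st.1 - 1
   else st.1, some ch)

def pvDepthAfter (depth : Int) (piece : List Char) : Int :=
  (piece.foldl pvDepthStep (depth, none)).1

-- one loop step over the remaining pieces: state (parts, buf, depth)
def pvStepB (st : List (List Char) × List Char × Int) (p : List Char) :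
    List (List Char) × List Char × Int :=
  let (parts, buf, depth) := st
  if depth = 0 then (parts ++ [buf], p, pvDepthAfter 0 p)
  else (parts, buf ++ ':' :: p, pvDepthAfter depth p)

def split_port_string_py_alt (s : String) : List String :=
  match PySem.Chars.splitOn s.toList [':'] with
  | [] => []   -- unreachable: str.split never returns an empty list
  | p :: ps =>
    let r := ps.foldl pvStepB ([], p, pvDepthAfter 0 p)
    (r.1 ++ [r.2.1]).map String.ofList

-- ===== PRECONDITION & SPEC =====
def Spec_split_port_string_py (s : String) (out : List String) : Prop := out = split_port_string_py_alt s
instance (s : String) (out : List String) : Decidable (Spec_split_port_string_py s out) := by unfold Spec_split_port_string_py; infer_instance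

-- ===== CLAIM (what is proved, stated in full; the proofs are below) =====
def Claim_equal_split_port_string_py : Prop := ∀ (s : String), Dom_split_port_string_py s → Spec_split_port_string_py s (split_port_string_py s)

-- ===== LEMMAS AND PROOFS =====

-- depth scan with an explicit previous-character argument (recursive form of pvDepthAfter)
def pvDepthScan : Int → Option Char → List Char → Int
  | d, _, [] => d
  | d, prev, ch :: rest =>
      pvDepthScan (if ch = '{' ∧ prev = some '$' then d + 1
                   else if ch = '}' ∧ 0 < d then d - 1 else d) (some ch) rest

theorem pvDepthAfter_eq_scan_aux (p : List Char) :
    ∀ d prev, (p.foldl pvDepthStep (d, prev)).1 = pvDepthScan d prev p := by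
  induction p with
  | nil => intro d prev; rfl
  | cons ch rest ih =>
      intro d prev
      simp only [List.foldl_cons, pvDepthScan, pvDepthStep]
      exact ih _ _

theorem pvDepthAfter_eq_scan (d : Int) (p : List Char) :
    pvDepthAfter d p = pvDepthScan d none p := pvDepthAfter_eq_scan_aux p d none

-- only the first character of a piece can see `prev`; any non-'$' prev behaves like none
theorem pvDepthScan_irrel (d : Int) (c : Char) (hc : c ≠ '$') (p : List Char) :
    pvDepthScan d (some c) p = pvDepthScan d none p := by
  cases p with
  | nil => rfl
  | cons ch rest =>
      simp only [pvDepthScan]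
      have h1 : (ch = '{' ∧ some c = some '$') ↔ (ch = '{' ∧ (none : Option Char) = some '$') := by
        simp [hc]
      simp only [h1]

-- one step of A on a non-colon character: append and update depth like pvDepthScan
theorem pvStepA_nonColon (parts : List (List Char)) (depth : Int) (current : List Char)
    (ch : Char) (h : ch ≠ ':') :
    pvStepA (parts, depth, current) ch =
      (parts,
       if ch = '{' ∧ current.getLast? = some '$' then depth + 1
       else if ch = '}' ∧ 0 < depth then depth - 1 else depth,
       current ++ [ch]) := by
  have hdb : ('$' : Char) ≠ '{' := by decide
  have hdc : ('$' : Char) ≠ '}' := by decide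
  simp only [pvStepA]
  by_cases h1 : ch = '$'
  · subst h1; simp [hdb, hdc]
  · by_cases h2 : ch = '{' ∧ current.getLast? = some '$'
    · simp [h2]
    · by_cases h3 : ch = '}' ∧ 0 < depth
      · simp [h3]
      · by_cases h4 : ch = ':' ∧ depth = 0
        · exact absurd h4.1 h
        · simp [h1, h2, h3, h4]

-- A's fold over a colon-free piece: no flush, all characters appended, depth scanned
theorem pvFoldA_piece (p : List Char) (hp : ':' ∉ p) :
    ∀ parts (depth : Int) current,
      p.foldl pvStepA (parts, depth, current) =
        (parts, pvDepthScan depth current.getLast? p, current ++ p) := by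
  induction p with
  | nil => intro parts depth current; simp [pvDepthScan]
  | cons ch rest ih =>
      intro parts depth current
      have hch : ch ≠ ':' := fun hh => hp (hh ▸ List.mem_cons_self ..)
      have hrest : ':' ∉ rest := fun hh => hp (List.mem_cons_of_mem _ hh)
      simp only [List.foldl_cons]
      rw [pvStepA_nonColon _ _ _ _ hch, ih hrest]
      simp [pvDepthScan]

-- simple recursive split on ':' (reference form of str.split(":"))
def pvMySplit : List Char → List (List Char)
  | [] => [[]]
  | c :: rest =>
      if c = ':' then [] :: pvMySplit rest
      else (c :: (pvMySplit rest).headI) :: (pvMySplit rest).tail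

theorem pvMySplit_ne_nil (l : List Char) : pvMySplit l ≠ [] := by
  cases l with
  | nil => simp [pvMySplit]
  | cons c rest => by_cases h : c = ':' <;> simp [pvMySplit, h]

theorem pvMySplit_free (l : List Char) : ∀ p ∈ pvMySplit l, ':' ∉ p := by
  induction l with
  | nil => intro p hp; simp [pvMySplit] at hp; simp [hp]
  | cons c rest ih =>
      intro p hp
      rcases hne : pvMySplit rest with _ | ⟨q, ps⟩
      · exact absurd hne (pvMySplit_ne_nil rest)
      · rw [hne] at ih
        by_cases h : c = ':'
        · simp [pvMySplit, h, hne] at hp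
          rcases hp with hp | hp | hp
          · simp [hp]
          · exact hp ▸ ih q (List.mem_cons_self ..)
          · exact ih p (List.mem_cons_of_mem _ hp)
        · simp [pvMySplit, h, hne] at hp
          rcases hp with hp | hp
          · subst hp
            intro hmem
            rcases List.mem_cons.mp hmem with hh | hh
            · exact h hh.symm
            · exact ih q (List.mem_cons_self ..) hh
          · exact ih p (List.mem_cons_of_mem _ hp)

-- join pieces back with ':' between them
def pvJoinColon : List (List Char) → List Char
  | [] => []
  | [p] => p
  | p :: q :: ps => p ++ ':' :: pvJoinColon (q :: ps)

theorem pvJoinColon_mySplit (l : List Char) : pvJoinColon (pvMySplit l) = l := by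
  induction l with
  | nil => rfl
  | cons c rest ih =>
      rcases hne : pvMySplit rest with _ | ⟨q, ps⟩
      · exact absurd hne (pvMySplit_ne_nil rest)
      · rw [hne] at ih
        by_cases h : c = ':'
        · subst h
          simp [pvMySplit, hne, pvJoinColon, ih]
        · simp only [pvMySplit, if_neg h, hne, List.headI, List.tail]
          cases ps with
          | nil => simpa [pvJoinColon] using ih
          | cons r rs => simpa [pvJoinColon] using ih

-- PySem's split with separator ":" is pvMySplit
theorem pvSplitOn_go_eq (l : List Char) :
    ∀ (fuel : Nat) (cur : List Char) (acc : List (List Char)), l.length < fuel →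
      PySem.Chars.splitOn.go [':'] fuel l cur acc =
        acc.reverse ++ ((cur.reverse ++ (pvMySplit l).headI) :: (pvMySplit l).tail) := by
  induction l with
  | nil =>
      intro fuel cur acc hf
      cases fuel with
      | zero => omega
      | succ f => simp [PySem.Chars.splitOn.go, pvMySplit]
  | cons c rest ih =>
      intro fuel cur acc hf
      cases fuel with
      | zero => omega
      | succ f =>
        simp only [List.length_cons] at hf
        by_cases h : c = ':'
        · subst h
          rw [PySem.Chars.splitOn.go]
          have hpre : [':'].isPrefixOf (':' :: rest) = true := by simp [List.isPrefixOf]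
          rw [if_pos hpre]
          simp only [List.length_singleton, List.drop_succ_cons, List.drop_zero]
          rw [ih f [] (cur.reverse :: acc) (by omega)]
          rcases hm : pvMySplit rest with _ | ⟨a, b⟩
          · exact absurd hm (pvMySplit_ne_nil rest)
          · simp [pvMySplit, hm]
        · rw [PySem.Chars.splitOn.go]
          have hpre : [':'].isPrefixOf (c :: rest) = false := by
            simp [List.isPrefixOf]; exact fun hh => absurd hh.symm h
          rw [if_neg (by simp [hpre])]
          rw [ih f (c :: cur) acc (by omega)]
          simp [pvMySplit, h]

theorem pvSplitOn_eq (l : List Char) : PySem.Chars.splitOn l [':'] = pvMySplit l := by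
  rw [PySem.Chars.splitOn, pvSplitOn_go_eq l (l.length + 1) [] [] (by omega)]
  rcases hne : pvMySplit l with _ | ⟨q, ps⟩
  · exact absurd hne (pvMySplit_ne_nil l)
  · simp

-- recursive form of B's merge loop
def pvRunB : Int → List Char → List (List Char) → List (List Char)
  | _, buf, [] => [buf]
  | d, buf, p :: ps =>
      if d = 0 then buf :: pvRunB (pvDepthScan 0 none p) p ps
      else pvRunB (pvDepthScan d none p) (buf ++ ':' :: p) ps

theorem pvFoldB_runB (ps : List (List Char)) :
    ∀ parts buf (depth : Int),
      (ps.foldl pvStepB (parts, buf, depth)).1 ++ [(ps.foldl pvStepB (parts, buf, depth)).2.1] =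
        parts ++ pvRunB depth buf ps := by
  induction ps with
  | nil => intro parts buf depth; simp [pvRunB]
  | cons p rest ih =>
      intro parts buf depth
      simp only [List.foldl_cons, pvStepB]
      by_cases h : depth = 0
      · simp only [pvRunB, h]
        rw [ih, pvDepthAfter_eq_scan]
        simp
      · simp only [pvRunB, if_neg h]
        rw [ih, pvDepthAfter_eq_scan]

-- MAIN: A's machine over joined colon-free pieces equals B's merge of the pieces
theorem pvMain (pieces : List (List Char)) (hfree : ∀ p ∈ pieces, ':' ∉ p) :
    ∀ (q : List Char), ':' ∉ q → ∀ parts (depth : Int) current,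
      ((pvJoinColon (q :: pieces)).foldl pvStepA (parts, depth, current)).1 ++
        [((pvJoinColon (q :: pieces)).foldl pvStepA (parts, depth, current)).2.2] =
        parts ++ pvRunB (pvDepthScan depth current.getLast? q) (current ++ q) pieces := by
  induction pieces with
  | nil =>
      intro q hq parts depth current
      simp only [pvJoinColon]
      rw [pvFoldA_piece q hq]
      simp [pvRunB]
  | cons p rest ih =>
      intro q hq parts depth current
      simp only [pvJoinColon]
      rw [List.foldl_append, pvFoldA_piece q hq, List.foldl_cons]
      have hp : ':' ∉ p := hfree p (List.mem_cons_self ..)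
      have hrest : ∀ r ∈ rest, ':' ∉ r := fun r hr => hfree r (List.mem_cons_of_mem _ hr)
      set d1 := pvDepthScan depth current.getLast? q with hd1
      by_cases h : d1 = 0
      · have hstep : pvStepA (parts, d1, current ++ q) ':' = (parts ++ [current ++ q], d1, []) := by
          simp [pvStepA, h]
        rw [hstep]
        rw [ih hrest p hp (parts ++ [current ++ q]) d1 []]
        simp only [pvRunB, if_pos h, List.getLast?_nil]
        simp [h]
      · have hstep : pvStepA (parts, d1, current ++ q) ':' = (parts, d1, (current ++ q) ++ [':']) := by
          have c1 : (':' : Char) ≠ '$' := by decide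
          have c2 : (':' : Char) ≠ '{' := by decide
          have c3 : (':' : Char) ≠ '}' := by decide
          simp [pvStepA, c1, c2, c3, h]
        rw [hstep]
        rw [ih hrest p hp parts d1 ((current ++ q) ++ [':'])]
        simp only [pvRunB, if_neg h]
        rw [List.getLast?_concat, pvDepthScan_irrel _ _ (by decide) p]
        simp

-- ===== VERDICT (by name: the statement is the Claim_ definition above) =====
theorem split_port_string_py_spec : Claim_equal_split_port_string_py := by
  intro s _
  unfold Spec_split_port_string_py
  rcases hne : pvMySplit s.toList with _ | ⟨p, ps⟩
  · exact absurd hne (pvMySplit_ne_nil s.toList)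
  · have hfree := pvMySplit_free s.toList
    rw [hne] at hfree
    have hjoin : pvJoinColon (p :: ps) = s.toList := by rw [← hne, pvJoinColon_mySplit]
    have hp : ':' ∉ p := hfree p (List.mem_cons_self ..)
    have hps : ∀ r ∈ ps, ':' ∉ r := fun r hr => hfree r (List.mem_cons_of_mem _ hr)
    have hmain := pvMain ps hps p hp [] 0 []
    rw [hjoin] at hmain
    simp only [List.getLast?_nil, List.nil_append] at hmain
    simp only [split_port_string_py, split_port_string_py_alt, pvSplitOn_eq, hne]
    rw [pvFoldB_runB, pvDepthAfter_eq_scan, hmain]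
    simp
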